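-- pv_equiv track=rewrite | github.com/schurterb/dnadecode | baseConversion.py | convert2Base10
-- ===== SOURCE A (Python) =====
-- def convert2Base10(number, base):   #Converts a number from the specified base to base 10
--     result = 0
--     temp = number   #store a backup of the original number
--
--     if base != 10:  #If the number is already in base10, just return the original number
--         ii = 0
--         while temp > 0:
--             result += temp%10 * pow(base, ii)
--             temp = temp//10 #Use floor division, we do not want any decimals
--             ii += 1
--
--     else:
--         result = number
--
--     return result
-- ===== SOURCE B (Python) =====
-- def convert2Base10(number, base):
--     if base == 10:
--         return number
--     digits = []
--     temp = number
--     while temp > 0: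
--         digits.append(temp % 10)
--         temp //= 10
--     result = 0
--     for d in reversed(digits):
--         result = result * base + d
--     return result
-- ===== Notes on version B (the rewrite author's own statement) =====
-- stated objective: alternative
-- what changed: B first extracts the decimal digits into a list, then evaluates the value by Horner's method (accumulator * base + digit over digits most-significant-first), eliminating the pow(base, ii) computation inside the loop.
import Mathlib
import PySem

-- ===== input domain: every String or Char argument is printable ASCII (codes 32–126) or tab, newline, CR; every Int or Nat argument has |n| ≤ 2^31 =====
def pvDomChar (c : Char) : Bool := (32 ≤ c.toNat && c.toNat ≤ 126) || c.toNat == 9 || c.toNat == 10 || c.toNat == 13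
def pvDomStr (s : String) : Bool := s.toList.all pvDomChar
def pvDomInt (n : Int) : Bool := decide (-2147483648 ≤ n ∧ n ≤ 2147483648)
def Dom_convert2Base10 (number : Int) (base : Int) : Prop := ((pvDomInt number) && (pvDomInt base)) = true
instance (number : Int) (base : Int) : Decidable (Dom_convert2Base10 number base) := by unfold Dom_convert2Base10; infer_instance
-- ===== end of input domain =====

-- B changes the decomposition (digit list + Horner accumulator instead of summing digit*pow(base,ii)); same results, similar cost.

-- termination helper for both loops (cited in decreasing_by)
theorem pvDiv10_lt (t : Int) (h : t > 0) : (PySem.Int.floordiv t 10).toNat < t.toNat := by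
  rw [PySem.Int.floordiv_eq_ediv_of_pos (by omega : (0:Int) < 10)]
  omega

-- ===== PORT A =====
-- the while loop: state (temp, ii, result)
def convert2Base10.loop (base : Int) (temp : Int) (ii : Nat) (result : Int) : Int :=
  if temp > 0 then
    convert2Base10.loop base (PySem.Int.floordiv temp 10) (ii + 1)
      (result + PySem.Int.mod temp 10 * base ^ ii)
  else result
termination_by temp.toNat
decreasing_by exact pvDiv10_lt temp (by assumption)

def convert2Base10 (number : Int) (base : Int) : Int :=
  if base ≠ 10 then convert2Base10.loop base number 0 0
  else number

-- ===== PORT B =====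
-- extract decimal digits, least significant first
def convert2Base10_alt.digits (temp : Int) : List Int :=
  if temp > 0 then PySem.Int.mod temp 10 :: convert2Base10_alt.digits (PySem.Int.floordiv temp 10)
  else []
termination_by temp.toNat
decreasing_by exact pvDiv10_lt temp (by assumption)

def convert2Base10_alt (number : Int) (base : Int) : Int :=
  if base = 10 then number
  else (convert2Base10_alt.digits number).reverse.foldl (fun r d => r * base + d) 0

-- ===== PRECONDITION & SPEC =====
def Spec_convert2Base10 (number : Int) (base : Int) (out : Int) : Prop := out = convert2Base10_alt number base
instance (number : Int) (base : Int) (out : Int) : Decidable (Spec_convert2Base10 number base out) := by unfold Spec_convert2Base10; infer_instance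

-- ===== CLAIM (what is proved, stated in full; the proofs are below) =====
def Claim_equal_convert2Base10 : Prop := ∀ (number : Int) (base : Int), Dom_convert2Base10 number base → Spec_convert2Base10 number base (convert2Base10 number base)

-- ===== LEMMAS AND PROOFS =====

-- value of an LSB-first digit list
def pvVal (base : Int) : List Int → Int
  | [] => 0
  | d :: ds => d + base * pvVal base ds

theorem loop_eq_val (base : Int) (temp : Int) : ∀ (ii : Nat) (result : Int),
    convert2Base10.loop base temp ii result
      = result + base ^ ii * pvVal base (convert2Base10_alt.digits temp) := by
  induction temp using convert2Base10_alt.digits.induct with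
  | case1 t ih h =>
      intro ii result
      rw [convert2Base10.loop, convert2Base10_alt.digits]
      simp only [h, if_pos, ih]
      simp [pvVal, pow_succ]
      ring
  | case2 t h =>
      intro ii result
      rw [convert2Base10.loop, convert2Base10_alt.digits]
      simp [h, pvVal]

theorem horner_eq_val (base : Int) (l : List Int) (acc : Int) :
    l.reverse.foldl (fun r d => r * base + d) acc = acc * base ^ l.length + pvVal base l := by
  induction l generalizing acc with
  | nil => simp [pvVal]
  | cons d ds ih =>
      simp only [List.reverse_cons, List.foldl_append, List.foldl_cons, List.foldl_nil, ih,
        pvVal, List.length_cons, pow_succ]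
      ring

-- ===== VERDICT (by name: the statement is the Claim_ definition above) =====
theorem convert2Base10_spec : Claim_equal_convert2Base10 := by
  intro number base _
  unfold Spec_convert2Base10 convert2Base10 convert2Base10_alt
  by_cases hb : base = 10
  · simp [hb]
  · simp only [hb, ne_eq, not_false_iff, if_pos, if_neg]
    rw [loop_eq_val, horner_eq_val]
    simp
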